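-- pv_equiv track=rewrite | github.com/RawwBear/WDI | Zestaw 3/04.py | e_extenstion
-- ===== SOURCE A (Python) =====
-- def long_dir(a, b, t):
--     for i in range(1, len(t)):
--         a *= 10
--         t[i] += a//b
--         a %= b
--         if a == 0: return #break function if a == 0
--
-- def e_extenstion(n):
--     digits = [1] + [0]*(n+10)#we need to have [1] + otherwise our solution will be 1.718... instead of 2.718...
--     fact = 1
--     k = 1
--     while fact <= 10**(n+1):
--         fact *= k
--         k += 1
--         long_dir(1, fact, digits)#change a and t value for us it means that 1 is changed and digits list now will contains decimal extension of 1/fact to n places after comma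
--     for i in range(len(digits)-1, 0, -1):
--         #Wykonuje operacje jak w dodawaniu piesmnym przenosze cyfre o jeden do przodu jezeli liczba jest wieksza niz 9
--         digits[i-1] += digits[i]//10
--         digits[i] %= 10
--     return str(digits[0]) + '.'+ ''.join(map(str, digits[1:n+1]))
-- ===== SOURCE B (Python) =====
-- def _dec(x, width):
--     # decimal digits of x, zero-padded to `width`, built in 1000-digit chunks
--     # (avoids CPython's int->str conversion limit on huge values)
--     parts = []
--     while width > 1000:
--         x, lo = divmod(x, 10**1000)
--         parts.append(str(lo).zfill(1000))
--         width -= 1000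
--     parts.append(str(x).zfill(width))
--     return ''.join(reversed(parts))
--
-- def e_extenstion(n):
--     # Accumulate each truncated term floor(10**(n+10)/k!) into one big integer
--     # (10 guard digits), then split it into integer part and n fractional digits.
--     power = 10**(n+10)
--     total = power  # the leading digit 1 scaled up
--     fact = 1
--     k = 1
--     while fact <= 10**(n+1):
--         fact *= k
--         k += 1
--         total += power // fact
--     return str(total // power) + '.' + _dec(total % power, n+10)[:n]
-- ===== Notes on version B (the rewrite author's own statement) =====
-- stated objective: faster
-- what changed: Replaces the per-term digit-array long division (long_dir) and the final manual carry pass with a single big-integer accumulator total += power//fact (power = 10**(n+10)), formatted at the end via str/zfill/slice; the loop over k! is kept identical.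
-- outside the precondition, e.g. on e_extenstion(-1): A returns '2.', B returns '2.50000000'; on e_extenstion(-2): A returns '1.0000000', B returns '1.000000'
import Mathlib
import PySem

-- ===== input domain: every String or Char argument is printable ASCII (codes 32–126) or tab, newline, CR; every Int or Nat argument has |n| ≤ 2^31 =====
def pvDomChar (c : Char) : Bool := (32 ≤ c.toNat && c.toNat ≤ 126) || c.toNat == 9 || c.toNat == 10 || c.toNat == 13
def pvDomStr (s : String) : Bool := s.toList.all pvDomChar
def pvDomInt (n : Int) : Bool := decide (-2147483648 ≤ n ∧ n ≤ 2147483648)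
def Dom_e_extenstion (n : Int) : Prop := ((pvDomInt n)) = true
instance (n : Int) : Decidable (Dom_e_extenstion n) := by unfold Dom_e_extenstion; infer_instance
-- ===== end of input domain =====

-- B replaces A's per-term digit-array long division and final carry pass with one
-- big-integer accumulator (sum of the truncated terms floor(10^(n+10)/k!)) formatted
-- via zfill and slicing; the loop over k! is the same in both.

-- ===== PORT A =====
-- long_dir(a, b, t): the loop over indices 1..len(t)-1, acting on the tail of t;
-- the `if a == 0: return` early exit is the first branch after the update.
def longDirGo (a b : Int) : List Int → List Int
  | [] => []
  | x :: xs =>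
    let a' := a * 10
    let x' := x + PySem.Int.floordiv a' b
    let a'' := PySem.Int.mod a' b
    if a'' = 0 then x' :: xs else x' :: longDirGo a'' b xs

def longDir (a b : Int) : List Int → List Int
  | [] => []
  | h :: tl => h :: longDirGo a b tl

-- the `while fact <= 10**(n+1)` loop; the fuel strictly exceeds the number of
-- iterations (at loop head number i ≥ 2, fact = (i-1)! ≥ i-1), so the recursion
-- always stops on the condition, exactly as the Python while does.
def loopA (fuel : Nat) (limit fact k : Int) (t : List Int) : List Int :=
  match fuel with
  | 0 => t
  | fuel + 1 =>
    if fact ≤ limit then loopA fuel limit (fact * k) (k + 1) (longDir 1 (fact * k) t)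
    else t

-- the carry loop `for i in range(len(digits)-1, 0, -1)`, right to left over the
-- tail: returns (carry into position 0, normalised tail)
def carryGo : List Int → Int × List Int
  | [] => (0, [])
  | x :: xs =>
    let p := carryGo xs
    let x' := x + p.1
    (PySem.Int.floordiv x' 10, PySem.Int.mod x' 10 :: p.2)

def carryAll (t : List Int) : List Int :=
  match t with
  | [] => []
  | d0 :: tl => (d0 + (carryGo tl).1) :: (carryGo tl).2

-- limit = 10**(n+1); for n+1 < 0 Python's value is a float in (0,1), below fact ≥ 1,
-- so limit 0 keeps the loop equally dead (exact for every n). `+` on Python str is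
-- concatenation of code points, built with String.ofList over List Char.
def e_extenstion (n : Int) : String :=
  let digits0 : List Int := 1 :: List.replicate (n + 10).toNat 0
  let limit : Int := if 0 ≤ n + 1 then (10 : Int) ^ (n + 1).toNat else 0
  let digits1 := loopA (limit.toNat + 3) limit 1 1 digits0
  let digits2 := carryAll digits1
  -- str(digits[0]) + '.' + ''.join(map(str, digits[1:n+1]))
  String.ofList (PySem.Int.toChars (digits2.headD 0) ++ '.' ::
    PySem.Chars.join [] ((PySem.List.slice digits2 (some 1) (some (n + 1))).map PySem.Int.toChars))

-- ===== PORT B =====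
-- the identical while loop, accumulating total += power // fact
def loopB (fuel : Nat) (pw limit fact k total : Int) : Int :=
  match fuel with
  | 0 => total
  | fuel + 1 =>
    if fact ≤ limit then loopB fuel pw limit (fact * k) (k + 1) (total + PySem.Int.floordiv pw (fact * k))
    else total

-- _dec(x, width): zero-padded decimal built in 1000-digit chunks; the Python
-- accumulates the low chunks in `parts` and joins them reversed, which is this
-- recursion (high part first, then the last-peeled low chunk) chunk for chunk.
def decChunks (x width : Int) : List Char :=
  if h : 1000 < width then
    decChunks (PySem.Int.floordiv x ((10 : Int) ^ (1000 : Nat))) (width - 1000) ++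
      PySem.Chars.zfill (PySem.Int.toChars (PySem.Int.mod x ((10 : Int) ^ (1000 : Nat)))) 1000
  else PySem.Chars.zfill (PySem.Int.toChars x) width
termination_by width.toNat
decreasing_by omega

def e_extenstion_alt (n : Int) : String :=
  let pw : Int := (10 : Int) ^ (n + 10).toNat   -- power = 10**(n+10), exact for n ≥ -10
  let limit : Int := if 0 ≤ n + 1 then (10 : Int) ^ (n + 1).toNat else 0   -- as in port A
  let total := loopB (limit.toNat + 3) pw limit 1 1 pw
  -- str(total // power) + '.' + _dec(total % power, n+10)[:n]
  String.ofList (PySem.Int.toChars (PySem.Int.floordiv total pw) ++ '.' ::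
    PySem.Chars.slice (decChunks (PySem.Int.mod total pw) (n + 10)) none (some n))

-- ===== PRECONDITION & SPEC =====
-- Pre_ restricts to the natural domain, a non-negative count of decimal places.
-- For n < 0 (a negative digit count) A still returns, but only degenerate accidents
-- of its float limit 10**(n+1) and of negative slice bounds (see the cited examples).
def Pre_e_extenstion (n : Int) : Prop := 0 ≤ n
instance (n : Int) : Decidable (Pre_e_extenstion n) := by unfold Pre_e_extenstion; infer_instance
def pvWitness_e_extenstion : Int := (3)

def Spec_e_extenstion (n : Int) (out : String) : Prop := out = e_extenstion_alt n
instance (n : Int) (out : String) : Decidable (Spec_e_extenstion n out) := by unfold Spec_e_extenstion; infer_instance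

-- ===== CLAIM (what is proved, stated in full; the proofs are below) =====
def Claim_equal_e_extenstion : Prop := ∀ (n : Int), Dom_e_extenstion n → Pre_e_extenstion n → Spec_e_extenstion n (e_extenstion n)

-- ===== LEMMAS AND PROOFS =====

-- value of a big-endian digit-coefficient list (and its Nat counterpart)
def pvVal : List Int → Int
  | [] => 0
  | x :: xs => x * 10 ^ xs.length + pvVal xs

def pvValN : List Nat → Nat
  | [] => 0
  | x :: xs => x * 10 ^ xs.length + pvValN xs

-- big-endian, zero-padded decimal digits of r in width L
def pvPad (r : Nat) : Nat → List Char
  | 0 => []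
  | L + 1 => Nat.digitChar (r / 10 ^ L % 10) :: pvPad (r % 10 ^ L) L

theorem longDirGo_length (a b : Int) (xs : List Int) :
    (longDirGo a b xs).length = xs.length := by
  induction xs generalizing a with
  | nil => rfl
  | cons x xs ih => simp only [longDirGo]; split <;> simp [ih]

theorem longDirGo_nonneg (b : Int) (hb : 0 < b) :
    ∀ (xs : List Int) (a : Int), 0 ≤ a → (∀ x ∈ xs, 0 ≤ x) →
      ∀ x ∈ longDirGo a b xs, 0 ≤ x := by
  intro xs
  induction xs with
  | nil => intro a _ _ x hx; simp [longDirGo] at hx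
  | cons y ys ih =>
    intro a ha hall x hx
    simp only [longDirGo] at hx
    rw [PySem.Int.floordiv_eq_ediv_of_pos hb] at hx
    have hy : 0 ≤ y + a * 10 / b :=
      add_nonneg (hall y (by simp)) (Int.ediv_nonneg (by positivity) hb.le)
    split at hx
    · rcases List.mem_cons.mp hx with h | h
      · omega
      · exact hall x (by simp [h])
    · rcases List.mem_cons.mp hx with h | h
      · omega
      · exact ih _ (PySem.Int.mod_nonneg _ hb) (fun z hz => hall z (by simp [hz])) x h

theorem longDirGo_val (b : Int) (hb : 0 < b) :
    ∀ (xs : List Int) (a : Int), 0 ≤ a → a < b →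
      pvVal (longDirGo a b xs) = pvVal xs + a * 10 ^ xs.length / b := by
  intro xs
  induction xs with
  | nil =>
    intro a ha hab
    simp [longDirGo, pvVal, Int.ediv_eq_zero_of_lt ha hab]
  | cons y ys ih =>
    intro a ha hab
    simp only [longDirGo, PySem.Int.floordiv_eq_ediv_of_pos hb, PySem.Int.mod_eq_emod_of_pos hb]
    set q := a * 10 / b with hq
    set r := a * 10 % b with hr
    have key : a * 10 = b * q + r := (Int.ediv_add_emod _ _).symm
    have hsplit : a * 10 ^ (ys.length + 1) / b = q * 10 ^ ys.length + r * 10 ^ ys.length / b := by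
      have h1 : a * 10 ^ (ys.length + 1) = r * 10 ^ ys.length + b * (q * 10 ^ ys.length) := by
        rw [pow_succ, show a * (10 ^ ys.length * 10) = a * 10 * 10 ^ ys.length by ring, key]; ring
      rw [h1, Int.add_mul_ediv_left _ _ (by omega : b ≠ 0)]; omega
    split
    · rename_i hz
      simp only [pvVal, List.length_cons]
      rw [hsplit, hz]
      simp; ring
    · rename_i hz
      simp only [pvVal, longDirGo_length, List.length_cons]
      rw [ih _ (Int.emod_nonneg _ (by omega)) (Int.emod_lt_of_pos _ hb), hsplit]
      ring

theorem longDir_tail_val (b : Int) (hb : 0 < b) (x : Int) (xs : List Int) :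
    pvVal (longDirGo 1 b (x :: xs)) = pvVal (x :: xs) + 10 ^ (x :: xs).length / b := by
  simp only [longDirGo, PySem.Int.floordiv_eq_ediv_of_pos hb, PySem.Int.mod_eq_emod_of_pos hb]
  set q := (1 : Int) * 10 / b with hq
  set r := (1 : Int) * 10 % b with hr
  have key : (10 : Int) = b * q + r := by
    have h0 := Int.mul_ediv_add_emod (1 * 10 : Int) b
    rw [← hq, ← hr] at h0; omega
  have hsplit : 10 ^ (xs.length + 1) / b = q * 10 ^ xs.length + r * 10 ^ xs.length / b := by
    have h1 : (10 : Int) ^ (xs.length + 1) = r * 10 ^ xs.length + b * (q * 10 ^ xs.length) := by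
      rw [pow_succ, show (10 : Int) ^ xs.length * 10 = 10 * 10 ^ xs.length by ring, key]; ring
    rw [h1, Int.add_mul_ediv_left _ _ (by omega : b ≠ 0)]; omega
  split
  · rename_i hz
    simp only [pvVal, List.length_cons]
    rw [hsplit, hz]
    simp; ring
  · rename_i hz
    simp only [pvVal, longDirGo_length, List.length_cons]
    rw [longDirGo_val b hb _ _ (Int.emod_nonneg _ (by omega)) (Int.emod_lt_of_pos _ hb), hsplit]
    ring

theorem pvVal_lt (xs : List Int) (h : ∀ d ∈ xs, 0 ≤ d ∧ d < 10) :
    0 ≤ pvVal xs ∧ pvVal xs < 10 ^ xs.length := by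
  induction xs with
  | nil => simp [pvVal]
  | cons x xs ih =>
    have hx := h x (by simp)
    have ihx := ih (fun d hd => h d (by simp [hd]))
    simp only [pvVal, List.length_cons, pow_succ]
    have hp : (0:Int) < 10 ^ xs.length := pow_pos (by norm_num) _
    constructor
    · nlinarith [ihx.1, hx.1]
    · nlinarith [ihx.1, ihx.2, hx.1, hx.2]

theorem pvVal_replicate_zero (L : Nat) : pvVal (List.replicate L 0) = 0 := by
  induction L with
  | zero => rfl
  | succ L ih => simp [pvVal, List.replicate_succ, ih]

theorem loop_lock (fuel : Nat) :
    ∀ (pw limit fact k h : Int) (tl : List Int), 0 < fact → 0 < k →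
      pw = 10 ^ tl.length → tl ≠ [] → (∀ x ∈ tl, 0 ≤ x) →
      ∃ tl', loopA fuel limit fact k (h :: tl) = h :: tl' ∧
        tl'.length = tl.length ∧ (∀ x ∈ tl', 0 ≤ x) ∧
        h * pw + pvVal tl' = loopB fuel pw limit fact k (h * pw + pvVal tl) := by
  induction fuel with
  | zero => intro pw limit fact k h tl _ _ _ _ hall; exact ⟨tl, rfl, rfl, hall, rfl⟩
  | succ fuel ih =>
    intro pw limit fact k h tl hf hk hpw hne hall
    simp only [loopA, loopB]
    split
    · obtain ⟨x, xs, rfl⟩ := List.exists_cons_of_ne_nil hne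
      have hfk : 0 < fact * k := mul_pos hf hk
      have hlen : (longDirGo 1 (fact * k) (x :: xs)).length = (x :: xs).length :=
        longDirGo_length _ _ _
      have hne' : longDirGo 1 (fact * k) (x :: xs) ≠ [] := by
        intro hc; rw [hc] at hlen; simp at hlen
      have hnn : ∀ y ∈ longDirGo 1 (fact * k) (x :: xs), 0 ≤ y :=
        longDirGo_nonneg _ hfk _ _ (by norm_num) hall
      obtain ⟨tl', h1, h2, h3, h4⟩ := ih pw limit (fact * k) (k + 1) h
        (longDirGo 1 (fact * k) (x :: xs)) hfk (by omega) (by rw [hlen, hpw]) hne' hnn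
      refine ⟨tl', by simpa [longDir] using h1, by rw [h2, hlen], h3, ?_⟩
      rw [h4, longDir_tail_val _ hfk, PySem.Int.floordiv_eq_ediv_of_pos hfk]
      congr 1
      rw [hpw]
      ring_nf
    · exact ⟨tl, rfl, rfl, hall, rfl⟩

theorem carryGo_spec (xs : List Int) (hx : ∀ x ∈ xs, 0 ≤ x) :
    (carryGo xs).2.length = xs.length ∧ 0 ≤ (carryGo xs).1 ∧
      (∀ d ∈ (carryGo xs).2, 0 ≤ d ∧ d < 10) ∧
      (carryGo xs).1 * 10 ^ xs.length + pvVal (carryGo xs).2 = pvVal xs := by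
  induction xs with
  | nil => simp [carryGo, pvVal]
  | cons x xs ih =>
    obtain ⟨ihlen, ihc, ihd, ihv⟩ := ih (fun z hz => hx z (by simp [hz]))
    have hx0 : 0 ≤ x := hx x (by simp)
    simp only [carryGo, PySem.Int.floordiv_eq_ediv_of_pos (by norm_num : (0:Int) < 10),
      PySem.Int.mod_eq_emod_of_pos (by norm_num : (0:Int) < 10)]
    have hxc : 0 ≤ x + (carryGo xs).1 := by omega
    refine ⟨by simp [ihlen], Int.ediv_nonneg hxc (by norm_num), ?_, ?_⟩
    · intro d hd
      rcases List.mem_cons.mp hd with h | h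
      · constructor
        · rw [h]; exact Int.emod_nonneg _ (by norm_num)
        · rw [h]; exact Int.emod_lt_of_pos _ (by norm_num)
      · exact ihd d h
    · simp only [pvVal, List.length_cons, ihlen]
      have hdm := Int.mul_ediv_add_emod (x + (carryGo xs).1) 10
      rw [pow_succ]
      linear_combination (10 ^ xs.length : Int) * hdm + ihv

theorem pvVal_natCast : ∀ (xs : List Int), (∀ x ∈ xs, 0 ≤ x) →
    pvVal xs = ((pvValN (xs.map Int.toNat) : Nat) : Int) := by
  intro xs
  induction xs with
  | nil => simp [pvVal, pvValN]
  | cons x xs ih =>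
    intro h
    have hx := h x (by simp)
    simp only [pvVal, List.map_cons, pvValN, ih (fun z hz => h z (by simp [hz]))]
    push_cast
    rw [Int.toNat_of_nonneg hx]
    simp

theorem pvValN_lt : ∀ (ds : List Nat), (∀ d ∈ ds, d < 10) →
    pvValN ds < 10 ^ ds.length := by
  intro ds
  induction ds with
  | nil => simp [pvValN]
  | cons d ds ih =>
    intro h
    have hd := h d (by simp)
    have ihd := ih (fun z hz => h z (by simp [hz]))
    simp only [pvValN, List.length_cons, pow_succ]
    have hp : 0 < 10 ^ ds.length := Nat.pow_pos (by norm_num)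
    nlinarith [hp]

theorem pvPad_length : ∀ (L r : Nat), (pvPad r L).length = L := by
  intro L
  induction L with
  | zero => intro r; rfl
  | succ L ih => intro r; simp [pvPad, ih]

theorem pvPad_snoc : ∀ (L r : Nat),
    pvPad r (L + 1) = pvPad (r / 10) L ++ [Nat.digitChar (r % 10)] := by
  intro L
  induction L with
  | zero => intro r; simp [pvPad]
  | succ L ih =>
    intro r
    have h1 : r / 10 ^ (L + 1) % 10 = (r / 10) / 10 ^ L % 10 := by
      rw [Nat.div_div_eq_div_mul, pow_succ, mul_comm (10 ^ L) 10]
    have h2 : (r % 10 ^ (L + 1)) / 10 = (r / 10) % 10 ^ L := by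
      rw [pow_succ, mul_comm, Nat.mod_mul_right_div_self]
    have h3 : (r % 10 ^ (L + 1)) % 10 = r % 10 :=
      Nat.mod_mod_of_dvd r (dvd_pow_self 10 (by omega))
    calc pvPad r (L + 2)
        = Nat.digitChar (r / 10 ^ (L + 1) % 10) :: pvPad (r % 10 ^ (L + 1)) (L + 1) := rfl
      _ = Nat.digitChar (r / 10 ^ (L + 1) % 10) ::
            (pvPad ((r % 10 ^ (L + 1)) / 10) L ++ [Nat.digitChar ((r % 10 ^ (L + 1)) % 10)]) := by rw [ih]
      _ = Nat.digitChar ((r / 10) / 10 ^ L % 10) ::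
            (pvPad ((r / 10) % 10 ^ L) L ++ [Nat.digitChar (r % 10)]) := by rw [h1, h2, h3]
      _ = pvPad (r / 10) (L + 1) ++ [Nat.digitChar (r % 10)] := rfl

theorem toDigits_mul_pow_add : ∀ (L m r : Nat), 0 < m → r < 10 ^ L →
    Nat.toDigits 10 (m * 10 ^ L + r) = Nat.toDigits 10 m ++ pvPad r L := by
  intro L
  induction L with
  | zero => intro m r hm hr; interval_cases r; simp [pvPad]
  | succ L ih =>
    intro m r hm hr
    have hrd : r / 10 < 10 ^ L := by
      rw [pow_succ] at hr
      exact Nat.div_lt_of_lt_mul (by omega)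
    have hn : 0 < m * 10 ^ L + r / 10 := by positivity
    have key : m * 10 ^ (L + 1) + r = 10 * (m * 10 ^ L + r / 10) + r % 10 := by
      have hdm := Nat.div_add_mod r 10
      rw [pow_succ]; ring_nf; omega
    rw [key, ← Nat.toDigits_append_toDigits (by norm_num) hn (Nat.mod_lt _ (by norm_num)),
      ih m (r / 10) hm hrd, Nat.toDigits_of_lt_base (Nat.mod_lt _ (by norm_num)),
      pvPad_snoc]
    simp

theorem pvPad_eq_pad_toDigits : ∀ (L r : Nat), r < 10 ^ L → 0 < L →
    pvPad r L = List.replicate (L - (Nat.toDigits 10 r).length) '0' ++ Nat.toDigits 10 r := by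
  intro L
  induction L with
  | zero => omega
  | succ L ih =>
    intro r hr _
    rcases Nat.eq_zero_or_pos L with hL | hL
    · subst hL
      have : (Nat.toDigits 10 r).length = 1 := by
        have := Nat.toDigits_of_lt_base (b := 10) (n := r) (by omega)
        rw [this]; rfl
      rw [Nat.toDigits_of_lt_base (by omega)]
      simp [pvPad, Nat.mod_eq_of_lt (show r < 10 by omega)]
    by_cases hcase : r < 10 ^ L
    · have hlen : (Nat.toDigits 10 r).length ≤ L :=
        (Nat.length_toDigits_le_iff (by norm_num) hL).mpr hcase
      have hd0 : r / 10 ^ L = 0 := Nat.div_eq_of_lt hcase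
      have hm : r % 10 ^ L = r := Nat.mod_eq_of_lt hcase
      simp only [pvPad, hd0, hm, Nat.zero_mod]
      rw [ih r hcase hL]
      have : L + 1 - (Nat.toDigits 10 r).length = (L - (Nat.toDigits 10 r).length) + 1 := by omega
      rw [this, List.replicate_succ]
      rfl
    · rw [not_lt] at hcase
      set m := r / 10 ^ L with hmdef
      have hm1 : 0 < m := Nat.div_pos hcase (Nat.pow_pos (by norm_num))
      have hm10 : m < 10 := by
        rw [hmdef]
        rw [pow_succ] at hr
        exact Nat.div_lt_of_lt_mul (by omega)
      have hrsplit : r = m * 10 ^ L + r % 10 ^ L := by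
        conv_lhs => rw [← Nat.div_add_mod r (10 ^ L)]
        rw [hmdef]; ring
      have hrm : r % 10 ^ L < 10 ^ L := Nat.mod_lt _ (Nat.pow_pos (by norm_num))
      have htd : Nat.toDigits 10 r = Nat.toDigits 10 m ++ pvPad (r % 10 ^ L) L := by
        conv_lhs => rw [hrsplit]
        exact toDigits_mul_pow_add L m (r % 10 ^ L) hm1 hrm
      have hlen : (Nat.toDigits 10 r).length = L + 1 := by
        rw [htd, List.length_append, pvPad_length, Nat.toDigits_of_lt_base hm10]
        simp [Nat.add_comm]
      rw [hlen]
      simp only [Nat.sub_self, List.replicate_zero, List.nil_append]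
      rw [htd, Nat.toDigits_of_lt_base hm10]
      simp only [pvPad, List.cons_append, List.nil_append]
      rw [← hmdef, Nat.mod_eq_of_lt hm10]

theorem pvPad_digits : ∀ (ds : List Nat), (∀ d ∈ ds, d < 10) →
    pvPad (pvValN ds) ds.length = ds.map Nat.digitChar := by
  intro ds
  induction ds with
  | nil => intro _; rfl
  | cons d tl ih =>
    intro h
    have hd := h d (by simp)
    have hlt := pvValN_lt tl (fun z hz => h z (by simp [hz]))
    have hdiv : (d * 10 ^ tl.length + pvValN tl) / 10 ^ tl.length = d := by
      rw [mul_comm, Nat.mul_add_div (Nat.pow_pos (by norm_num)), Nat.div_eq_of_lt hlt]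
      omega
    have hmod : (d * 10 ^ tl.length + pvValN tl) % 10 ^ tl.length = pvValN tl := by
      rw [Nat.mul_add_mod', Nat.mod_eq_of_lt hlt]
    simp only [pvValN, List.length_cons, pvPad, hdiv, hmod, Nat.mod_eq_of_lt hd,
      List.map_cons, ih (fun z hz => h z (by simp [hz]))]

theorem zfill_toDigits (v L : Nat) :
    PySem.Chars.zfill (Nat.toDigits 10 v) (L : Int) =
      List.replicate (L - (Nat.toDigits 10 v).length) '0' ++ Nat.toDigits 10 v := by
  by_cases hle : (L : Int) ≤ (Nat.toDigits 10 v).length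
  · have h0 : L - (Nat.toDigits 10 v).length = 0 := by omega
    rw [h0]
    simp only [PySem.Chars.zfill, hle, if_pos]
    rfl
  · obtain ⟨c, rest, hcr⟩ := List.exists_cons_of_ne_nil
      (List.ne_nil_of_length_pos (Nat.length_toDigits_pos (b := 10) (n := v)))
    have hcd : c.isDigit := Nat.isDigit_of_mem_toDigits (b := 10) (by norm_num) (by norm_num) (by rw [hcr]; simp)
    have hnc : ¬(c = '+' ∨ c = '-') := by
      rintro (rfl | rfl) <;> simp [Char.isDigit] at hcd
    rw [hcr] at hle ⊢
    simp only [PySem.Chars.zfill]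
    rw [if_neg hle, if_neg hnc]
    congr 2

theorem join_digit_chars : ∀ (l : List Int), (∀ d ∈ l, 0 ≤ d ∧ d < 10) →
    PySem.Chars.join [] (l.map PySem.Int.toChars) =
      l.map (fun d => Nat.digitChar d.toNat) := by
  intro l
  induction l with
  | nil => intro _; rfl
  | cons d tl ih =>
    intro h
    have hd := h d (by simp)
    have htc : PySem.Int.toChars d = [Nat.digitChar d.toNat] := by
      rw [PySem.Int.toChars, if_neg (by omega)]
      exact Nat.toDigits_of_lt_base (by omega)
    have hmap : (d :: tl).map PySem.Int.toChars
        = ((d :: tl).map (fun d => Nat.digitChar d.toNat)).map (fun ch => [ch]) := by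
      rw [List.map_map]
      apply List.map_congr_left
      intro z hz
      have hzb := h z hz
      simp only [Function.comp]
      rw [PySem.Int.toChars, if_neg (by omega)]
      exact Nat.toDigits_of_lt_base (by omega)
    rw [hmap, PySem.Chars.join_nil_singletons]

theorem pvPad_split : ∀ (b a r : Nat),
    pvPad r (a + b) = pvPad (r / 10 ^ b) a ++ pvPad (r % 10 ^ b) b := by
  intro b
  induction b with
  | zero => intro a r; simp [pvPad]
  | succ b ih =>
    intro a r
    have h1 : r / 10 / 10 ^ b = r / 10 ^ (b + 1) := by
      rw [Nat.div_div_eq_div_mul, pow_succ, mul_comm]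
    have h2 : (r % 10 ^ (b + 1)) / 10 = (r / 10) % 10 ^ b := by
      rw [pow_succ, mul_comm, Nat.mod_mul_right_div_self]
    have h3 : (r % 10 ^ (b + 1)) % 10 = r % 10 :=
      Nat.mod_mod_of_dvd r (dvd_pow_self 10 (by omega))
    calc pvPad r (a + (b + 1))
        = pvPad (r / 10) (a + b) ++ [Nat.digitChar (r % 10)] := pvPad_snoc _ _
      _ = pvPad (r / 10 / 10 ^ b) a ++ (pvPad ((r / 10) % 10 ^ b) b ++ [Nat.digitChar (r % 10)]) := by
          rw [ih]; simp
      _ = pvPad (r / 10 ^ (b + 1)) a ++ (pvPad ((r % 10 ^ (b + 1)) / 10) b ++ [Nat.digitChar ((r % 10 ^ (b + 1)) % 10)]) := by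
          rw [h1, h2, h3]
      _ = pvPad (r / 10 ^ (b + 1)) a ++ pvPad (r % 10 ^ (b + 1)) (b + 1) := by
          rw [← pvPad_snoc]

theorem decChunks_eq : ∀ (L : Nat), 0 < L → ∀ v : Nat, v < 10 ^ L →
    decChunks (v : Int) (L : Int) = pvPad v L := by
  intro L
  induction L using Nat.strong_induction_on with
  | _ L ih =>
    intro hL v hv
    rw [decChunks]
    have hc : ((10 : Int) ^ (1000 : Nat)) = ((10 ^ 1000 : Nat) : Int) := by push_cast; ring
    by_cases h : (1000 : Int) < (L : Int)
    · rw [dif_pos h]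
      have hL1000 : 1000 < L := by exact_mod_cast h
      have hwidth : ((L : Int) - 1000) = ((L - 1000 : Nat) : Int) := by omega
      have hdiv : PySem.Int.floordiv (v : Int) ((10 : Int) ^ (1000 : Nat))
          = ((v / 10 ^ 1000 : Nat) : Int) := by rw [hc]; exact PySem.Int.floordiv_natCast v _
      have hmod : PySem.Int.mod (v : Int) ((10 : Int) ^ (1000 : Nat))
          = ((v % 10 ^ 1000 : Nat) : Int) := by rw [hc]; exact PySem.Int.mod_natCast v _
      have hvd : v / 10 ^ 1000 < 10 ^ (L - 1000) := by
        rw [Nat.div_lt_iff_lt_mul (Nat.pow_pos (by norm_num)), ← pow_add]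
        have : L - 1000 + 1000 = L := by omega
        rw [this]; exact hv
      rw [hdiv, hmod, hwidth,
        ih (L - 1000) (by omega) (by omega) _ hvd]
      have hzl : (1000 : Int) = ((1000 : Nat) : Int) := by norm_num
      have htc : PySem.Int.toChars ((v % 10 ^ 1000 : Nat) : Int)
          = Nat.toDigits 10 (v % 10 ^ 1000) := by
        rw [PySem.Int.toChars, if_neg (by omega), Int.toNat_natCast]
      rw [htc, hzl, zfill_toDigits,
        ← pvPad_eq_pad_toDigits 1000 _ (Nat.mod_lt _ (Nat.pow_pos (by norm_num))) (by norm_num)]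
      have hsplit := pvPad_split 1000 (L - 1000) v
      rw [show L - 1000 + 1000 = L from by omega] at hsplit
      rw [← hsplit]
    · rw [dif_neg h]
      have htc : PySem.Int.toChars (v : Int) = Nat.toDigits 10 v := by
        rw [PySem.Int.toChars, if_neg (by omega), Int.toNat_natCast]
      rw [htc, zfill_toDigits, ← pvPad_eq_pad_toDigits L _ hv hL]

theorem main_eq (n : Int) (hn : 0 ≤ n) : e_extenstion n = e_extenstion_alt n := by
  obtain ⟨N, rfl⟩ : ∃ N : Nat, n = (N : Int) := ⟨n.toNat, (Int.toNat_of_nonneg hn).symm⟩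
  have h10 : ((N : Int) + 10).toNat = N + 10 := by omega
  have h1 : ((N : Int) + 1).toNat = N + 1 := by omega
  have hif : (if 0 ≤ (N : Int) + 1 then (10 : Int) ^ ((N : Int) + 1).toNat else 0)
      = (10 : Int) ^ (N + 1) := by rw [if_pos (by omega), h1]
  rw [e_extenstion, e_extenstion_alt]
  simp only [hif, h10]
  set limit : Int := (10 : Int) ^ (N + 1) with hlimit
  set pw : Int := (10 : Int) ^ (N + 10) with hpw
  set fuel : Nat := limit.toNat + 3 with hfuel
  -- the loop, in lockstep
  obtain ⟨tl', hA, hlen, hnn, hval⟩ := loop_lock fuel pw limit 1 1 1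
    (List.replicate (N + 10) 0) (by norm_num) (by norm_num)
    (by rw [List.length_replicate, hpw]) (by simp) (by intro x hx; rw [List.eq_of_mem_replicate hx])
  rw [pvVal_replicate_zero] at hval
  simp only [List.length_replicate] at hlen
  set T : Int := loopB fuel pw limit 1 1 pw with hT
  have hvalT : pw + pvVal tl' = T := by
    rw [show (1 : Int) * pw + 0 = pw from by ring, one_mul] at hval
    rw [hT]; exact hval
  rw [hA]
  -- the carry pass
  obtain ⟨clen, cnn, cdig, cval⟩ := carryGo_spec tl' hnn
  set c : Int := (carryGo tl').1 with hc
  set tl'' : List Int := (carryGo tl').2 with htl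
  have hR := pvVal_lt tl'' cdig
  rw [clen, hlen] at hR
  have hTd : T = (1 + c) * pw + pvVal tl'' := by
    rw [← hvalT, ← cval, hlen, hpw]; ring
  have hpwpos : (0 : Int) < pw := by rw [hpw]; positivity
  have hq : PySem.Int.floordiv T pw = 1 + c := by
    rw [PySem.Int.floordiv_eq_ediv_of_pos hpwpos, hTd,
      show (1 + c) * pw + pvVal tl'' = pvVal tl'' + pw * (1 + c) by ring,
      Int.add_mul_ediv_left _ _ (by omega), Int.ediv_eq_zero_of_lt hR.1 (by exact hR.2)]
    ring
  have hr : PySem.Int.mod T pw = pvVal tl'' := by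
    rw [PySem.Int.mod_eq_emod_of_pos hpwpos, hTd,
      show (1 + c) * pw + pvVal tl'' = pvVal tl'' + pw * (1 + c) by ring,
      Int.add_mul_emod_self_left, Int.emod_eq_of_lt hR.1 (by exact hR.2)]
  rw [carryAll, hq, hr]
  simp only [List.headD_cons]
  congr 1
  congr 1
  -- the fractional strings
  have hslice : PySem.List.slice ((1 + c) :: tl'') (some 1) (some ((N : Int) + 1))
      = tl''.take N := by
    have : ((N : Int) + 1) = ((N + 1 : Nat) : Int) := by push_cast; ring
    rw [this, show (some (1 : Int)) = some ((1 : Nat) : Int) by norm_num,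
      PySem.List.slice_natCast]
    simp
  rw [hslice, join_digit_chars _ (fun d hd => cdig d (List.mem_of_mem_take hd))]
  -- B side
  have hRnn : 0 ≤ pvVal tl'' := hR.1
  have hRlt : (pvVal tl'').toNat < 10 ^ (N + 10) := by
    have hlt := hR.2
    have h2 : ((10 : Int) ^ (N + 10)) = ((10 ^ (N + 10) : Nat) : Int) := by push_cast; ring
    rw [h2] at hlt
    omega
  have hds : ∀ d ∈ tl''.map Int.toNat, d < 10 := by
    intro d hd
    obtain ⟨x, hx, rfl⟩ := List.mem_map.mp hd
    have := cdig x hx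
    omega
  have hvalN : pvValN (tl''.map Int.toNat) = (pvVal tl'').toNat := by
    have := pvVal_natCast tl'' (fun x hx => (cdig x hx).1)
    omega
  have hlen'' : (tl''.map Int.toNat).length = N + 10 := by
    rw [List.length_map, clen, hlen]
  have hfracB : decChunks (pvVal tl'') ((N : Int) + 10)
      = tl''.map (fun d => Nat.digitChar d.toNat) := by
    rw [show pvVal tl'' = (((pvVal tl'').toNat : Nat) : Int) from (Int.toNat_of_nonneg hRnn).symm,
      show ((N : Int) + 10) = ((N + 10 : Nat) : Int) by push_cast; ring,
      decChunks_eq (N + 10) (by omega) _ hRlt,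
      ← hvalN, ← hlen'', pvPad_digits _ hds, List.map_map]
    rfl
  rw [show PySem.Chars.slice (decChunks (pvVal tl'') ((N:Int) + 10)) none (some (N:Int))
      = (decChunks (pvVal tl'') ((N:Int) + 10)).take N by
    rw [PySem.Chars.slice_eq_listSlice, PySem.List.slice_to_natCast]]
  rw [hfracB, List.map_take]

-- ===== VERDICT (by name: the statement is the Claim_ definition above) =====
theorem e_extenstion_spec : Claim_equal_e_extenstion := by
  intro n _ hpre
  show e_extenstion n = e_extenstion_alt n
  exact main_eq n hpre
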